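-- pv_equiv track=rewrite | github.com/louisjyluo/cat-gpt-desktop-pet | transformer.py | allZeroOrOne
-- ===== SOURCE A (Python) =====
-- def allZeroOrOne(c):
--     i0, i1 = 0,0
--     for i in c:
--         if i == 0:
--             i0 += 1
--     for i in c:
--         if i == 1:
--             i1 += 1
--     if i0 == 5 or i1 == 5:
--         return False
--     return True
-- ===== SOURCE B (Python) =====
-- def allZeroOrOne(c):
--     # Single early-exiting pass with counters saturated at 6: "count == 5" only
--     # needs counts distinguished up to 6, and once both saturate the result is fixed.
--     z = o = 0
--     for x in c:
--         if x == 0: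
--             z = min(z + 1, 6)
--         elif x == 1:
--             o = min(o + 1, 6)
--         if z == 6 and o == 6:
--             return True
--     return z != 5 and o != 5
-- ===== Notes on version B (the rewrite author's own statement) =====
-- stated objective: alternative
-- what changed: Replaces A's two exact counting passes by one early-exiting pass over a small bounded state machine: both counters saturate at 6 (enough to decide 'count == 5'), and the loop returns True as soon as both saturate since the answer is then fixed.
import Mathlib
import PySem

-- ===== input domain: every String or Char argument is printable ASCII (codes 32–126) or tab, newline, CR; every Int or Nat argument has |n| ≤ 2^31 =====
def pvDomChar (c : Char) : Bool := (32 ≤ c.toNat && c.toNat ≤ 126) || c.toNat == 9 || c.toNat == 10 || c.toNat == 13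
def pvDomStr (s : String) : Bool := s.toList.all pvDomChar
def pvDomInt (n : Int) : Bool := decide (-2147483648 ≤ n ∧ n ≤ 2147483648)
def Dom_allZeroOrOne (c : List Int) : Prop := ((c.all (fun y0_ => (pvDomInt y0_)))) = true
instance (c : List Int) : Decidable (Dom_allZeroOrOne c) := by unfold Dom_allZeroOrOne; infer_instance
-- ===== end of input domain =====

-- B replaces A's two exact counting passes by one early-exiting pass with counters saturated at 6 (alternative decomposition; same cost).

-- ===== PORT A =====
def allZeroOrOne (c : List Int) : Bool :=
  let i0 : Int := c.foldl (fun acc i => if i == 0 then acc + 1 else acc) 0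
  let i1 : Int := c.foldl (fun acc i => if i == 1 then acc + 1 else acc) 0
  if i0 == 5 || i1 == 5 then false else true

-- ===== PORT B =====
-- the for-loop of Source B with its early `return True`, as structural recursion over the list
def allZeroOrOneGo : List Int → Int → Int → Bool
  | [], z, o => z != 5 && o != 5
  | x :: t, z, o =>
    let z' := if x == 0 then min (z + 1) 6 else z
    let o' := if x != 0 && x == 1 then min (o + 1) 6 else o
    if z' == 6 && o' == 6 then true else allZeroOrOneGo t z' o'

def allZeroOrOne_alt (c : List Int) : Bool := allZeroOrOneGo c 0 0

-- ===== PRECONDITION & SPEC =====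
def Spec_allZeroOrOne (c : List Int) (out : Bool) : Prop := out = allZeroOrOne_alt c
instance (c : List Int) (out : Bool) : Decidable (Spec_allZeroOrOne c out) := by unfold Spec_allZeroOrOne; infer_instance

-- ===== CLAIM (what is proved, stated in full; the proofs are below) =====
def Claim_equal_allZeroOrOne : Prop := ∀ (c : List Int), Dom_allZeroOrOne c → Spec_allZeroOrOne c (allZeroOrOne c)

-- ===== LEMMAS AND PROOFS =====

theorem foldl_if_count (v : Int) (c : List Int) (acc : Int) :
    c.foldl (fun acc i => if i == v then acc + 1 else acc) acc = acc + c.count v := by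
  induction c generalizing acc with
  | nil => simp
  | cons h t ih =>
      simp only [List.foldl_cons, List.count_cons, ih]
      by_cases hv : h = v
      · simp [hv]; omega
      · simp [hv]


theorem allZeroOrOneGo_eq (c : List Int) : ∀ (z o : Int), z ≤ 6 → o ≤ 6 →
    allZeroOrOneGo c z o
      = decide (min (z + (c.count 0 : Int)) 6 ≠ 5 ∧ min (o + (c.count 1 : Int)) 6 ≠ 5) := by
  induction c with
  | nil =>
      intro z o hz6 ho6
      simp only [allZeroOrOneGo, List.count_nil, Nat.cast_zero, add_zero]
      rw [min_eq_left hz6, min_eq_left ho6]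
      by_cases h5 : z = 5 <;> by_cases h6 : o = 5 <;> simp [h5, h6]
  | cons x t ih =>
      intro z o hz6 ho6
      simp only [allZeroOrOneGo, List.count_cons]
      by_cases hx0 : x = 0
      · have hb0 : (x == (0 : Int)) = true := by simp [hx0]
        have hbe1 : (x == (1 : Int)) = false := by simp [hx0]
        simp only [hb0, hbe1, Bool.and_false, Bool.false_eq_true, if_false, if_true]
        by_cases hc : (min (z + 1) 6 == (6 : Int) && o == (6 : Int)) = true
        · rw [if_pos hc]
          simp only [Bool.and_eq_true, beq_iff_eq] at hc
          obtain ⟨hz', ho'⟩ := hc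
          symm; simp only [decide_eq_true_eq]
          push_cast
          omega
        · rw [if_neg hc, ih _ _ (by omega) ho6]
          simp only [decide_eq_decide]
          push_cast
          omega
      · by_cases hx1 : x = 1
        · have hb0 : (x == (0 : Int)) = false := by simp [hx0]
          have hbe1 : (x == (1 : Int)) = true := by simp [hx1]
          have hne0 : (x != (0 : Int)) = true := by simp [bne, hx0]
          simp only [hb0, hbe1, hne0, Bool.and_true, Bool.false_eq_true, if_false, if_true]
          by_cases hc : (z == (6 : Int) && min (o + 1) 6 == (6 : Int)) = true
          · rw [if_pos hc]
            simp only [Bool.and_eq_true, beq_iff_eq] at hc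
            obtain ⟨hz', ho'⟩ := hc
            symm; simp only [decide_eq_true_eq]
            push_cast
            omega
          · rw [if_neg hc, ih _ _ hz6 (by omega)]
            simp only [decide_eq_decide]
            push_cast
            omega
        · have hb0 : (x == (0 : Int)) = false := by simp [hx0]
          have hbe1 : (x == (1 : Int)) = false := by simp [hx1]
          simp only [hb0, hbe1, Bool.and_false, Bool.false_eq_true, if_false]
          by_cases hc : (z == (6 : Int) && o == (6 : Int)) = true
          · rw [if_pos hc]
            simp only [Bool.and_eq_true, beq_iff_eq] at hc
            obtain ⟨hz', ho'⟩ := hc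
            symm; simp only [decide_eq_true_eq]
            push_cast
            omega
          · rw [if_neg hc, ih _ _ hz6 ho6]
            simp only [Nat.add_zero]

-- ===== VERDICT (by name: the statement is the Claim_ definition above) =====
theorem allZeroOrOne_spec : Claim_equal_allZeroOrOne := by
  intro c _
  unfold Spec_allZeroOrOne allZeroOrOne allZeroOrOne_alt
  rw [allZeroOrOneGo_eq c 0 0 (by norm_num) (by norm_num)]
  simp only [foldl_if_count, zero_add]
  by_cases c0 : (c.count (0:Int) : Int) = 5 <;> by_cases c1 : (c.count (1:Int) : Int) = 5 <;>
    simp [c0, c1] <;> omega
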